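-- pv_equiv track=rewrite | github.com/alexey198631/trainings | edx_introduction_to_computer_science_and_programming_using_Python/Additional_units/unit 6 Algorithmic Complexity /test1.py | program2
-- ===== SOURCE A (Python) =====
-- def program2(x):
--     step = 0
--     total = 0
--     step += 1
--     for i in range(1000):
--         step += 1
--         total = i
--         step += 1
--
--     while x > 0:
--         step += 1
--         x = x//2
--         step += 1
--         total += x
--         step += 1
--
--     step += 1
--
--
--     return total, step + 1
-- ===== SOURCE B (Python) =====
-- def program2(x):
--     # closed form: the fixed loop always ends with total=999, step=2001;
--     # the halving loop runs bit_length(x) times and adds x - popcount(x) to total.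
--     total, step = 999, 2001
--     if x > 0:
--         total += x - bin(x).count('1')
--         step += 3 * x.bit_length()
--     return total, step + 2
-- ===== Notes on version B (the rewrite author's own statement) =====
-- stated objective: simpler
-- what changed: Replaced the constant 1000-iteration loop and the halving while-loop by a closed form using bit_length and popcount (the sum of successive halvings of x equals x minus popcount(x)).
import Mathlib
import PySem

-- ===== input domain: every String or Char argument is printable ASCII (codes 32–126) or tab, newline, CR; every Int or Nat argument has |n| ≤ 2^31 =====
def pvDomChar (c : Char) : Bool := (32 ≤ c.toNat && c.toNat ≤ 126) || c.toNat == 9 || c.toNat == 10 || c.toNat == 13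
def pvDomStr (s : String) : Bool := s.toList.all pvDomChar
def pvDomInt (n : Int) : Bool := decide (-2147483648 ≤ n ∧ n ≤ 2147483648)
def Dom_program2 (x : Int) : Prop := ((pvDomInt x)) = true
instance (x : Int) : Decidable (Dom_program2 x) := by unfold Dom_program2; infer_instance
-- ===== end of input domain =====

-- B replaces A's 1000-iteration constant loop and halving while-loop by a closed form (bit_length / popcount).


-- ===== PORT A =====
-- the while loop: state (x, total, step)
def program2Loop (x total step : Int) : Int × Int :=
  if 0 < x then
    program2Loop (PySem.Int.floordiv x 2) (total + PySem.Int.floordiv x 2) (step + 3)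
  else (total, step)
termination_by x.toNat
decreasing_by
  have h2 : PySem.Int.floordiv x 2 = x / 2 := PySem.Int.floordiv_eq_ediv_of_pos (by omega)
  rw [h2]; omega

def program2 (x : Int) : Int × Int :=
  -- step = 0; total = 0; step += 1; for i in range(1000): step += 1; total = i; step += 1
  let ts := (PySem.List.pyRange 0 1000 1).foldl (fun (ts : Int × Int) i => (i, ts.2 + 2)) (0, 1)
  -- while x > 0: step += 1; x = x//2; step += 1; total += x; step += 1
  let ts' := program2Loop x ts.1 ts.2
  -- step += 1; return total, step + 1
  (ts'.1, ts'.2 + 2)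

-- ===== PORT B =====
def program2_alt (x : Int) : Int × Int :=
  let total : Int := 999
  let step : Int := 2001
  if 0 < x then
    (total + x - (PySem.Int.bitCount x : Int), step + 3 * (PySem.Int.bitLength x : Int) + 2)
  else (total, step + 2)

-- ===== PRECONDITION & SPEC =====
def Spec_program2 (x : Int) (out : Int × Int) : Prop := out = program2_alt x
instance (x : Int) (out : Int × Int) : Decidable (Spec_program2 x out) := by unfold Spec_program2; infer_instance

-- ===== CLAIM (what is proved, stated in full; the proofs are below) =====
def Claim_equal_program2 : Prop := ∀ (x : Int), Dom_program2 x → Spec_program2 x (program2 x)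

-- ===== LEMMAS AND PROOFS =====
theorem program2Loop_eq (x total step : Int) :
    program2Loop x total step =
      if 0 < x then (total + x - (PySem.Int.bitCount x : Int), step + 3 * (PySem.Int.bitLength x : Int))
      else (total, step) := by
  induction x, total, step using program2Loop.induct with
  | case1 x total step hx ih =>
    rw [program2Loop, if_pos hx, ih, if_pos hx]
    have hmod : PySem.Int.mod x 2 = 0 ∨ PySem.Int.mod x 2 = 1 := by
      have := PySem.Int.mod_two_eq x; tauto
    have hdm := PySem.Int.floordiv_mul_add_mod x 2
    have hbc := PySem.Int.bitCount_of_pos (n := x) hx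
    have hbl := PySem.Int.bitLength_of_pos (n := x) hx
    by_cases h2 : 0 < PySem.Int.floordiv x 2
    · rw [if_pos h2, Prod.mk.injEq]
      refine ⟨?_, ?_⟩
      · rcases hmod with h | h <;>
          (rw [h] at hdm hbc; push_cast [hbc]; omega)
      · rw [hbl]; push_cast; ring
    · rw [if_neg h2]
      have hx1 : x = 1 := by
        have := PySem.Int.floordiv_eq_iff_of_pos (a := x) (b := 2) (q := PySem.Int.floordiv x 2) (by omega)
        have : PySem.Int.floordiv x 2 * 2 ≤ x ∧ x < (PySem.Int.floordiv x 2 + 1) * 2 := this.mp rfl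
        omega
      subst hx1
      norm_num [show PySem.Int.bitCount 1 = 1 from by decide,
        show PySem.Int.bitLength 1 = 1 from by decide,
        show PySem.Int.floordiv 1 2 = 0 from by decide]
  | case2 x total step hx =>
    rw [program2Loop, if_neg hx, if_neg hx]

set_option maxRecDepth 100000 in
theorem foldl_const :
    (PySem.List.pyRange 0 1000 1).foldl (fun (ts : Int × Int) i => (i, ts.2 + 2)) (0, 1) = (999, 2001) := by
  decide

-- ===== VERDICT (by name: the statement is the Claim_ definition above) =====
theorem program2_spec : Claim_equal_program2 := by
  intro x _
  simp only [Spec_program2, program2, program2_alt, foldl_const, program2Loop_eq]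
  split_ifs <;> simp
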